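-- pv_equiv track=rewrite | github.com/luisgdj/FinalProject | App.py | extraer_caracteristicas
-- ===== SOURCE A (Python) =====
-- def extraer_caracteristicas(smiles):
--     return {
--         "length": len(smiles),
--         "num_rings": sum(c.isdigit() for c in smiles),
--         "num_branches": smiles.count("("),
--         "double_bonds": smiles.count("="),
--         "triple_bonds": smiles.count("#"),
--         "aromatic_atoms": sum(smiles.count(c) for c in "cnosp"),
--         "num_N": smiles.count("N") + smiles.count("n"),
--         "num_O": smiles.count("O") + smiles.count("o"),
--         "num_S": smiles.count("S") + smiles.count("s"),
--         "num_P": smiles.count("P"),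
--         "num_F": smiles.count('F'),
--         "num_Cl": smiles.count('Cl'),
--         "num_Br": smiles.count('Br'),
--         "stereocenters": smiles.count("@"),
--         "net_charge": smiles.count("+") - smiles.count("-"),
--     }
-- ===== SOURCE B (Python) =====
-- def extraer_caracteristicas(smiles):
--     # one pass: per-character counter + two-char 'Cl'/'Br' detection via previous char
--     counts = {}
--     num_cl = num_br = num_digits = 0
--     prev = None
--     for c in smiles:
--         counts[c] = counts.get(c, 0) + 1
--         if c.isdigit():
--             num_digits += 1
--         if prev == 'C' and c == 'l':
--             num_cl += 1
--         if prev == 'B' and c == 'r':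
--             num_br += 1
--         prev = c
--     g = counts.get
--     return {
--         "length": len(smiles),
--         "num_rings": num_digits,
--         "num_branches": g('(', 0),
--         "double_bonds": g('=', 0),
--         "triple_bonds": g('#', 0),
--         "aromatic_atoms": g('c', 0) + g('n', 0) + g('o', 0) + g('s', 0) + g('p', 0),
--         "num_N": g('N', 0) + g('n', 0),
--         "num_O": g('O', 0) + g('o', 0),
--         "num_S": g('S', 0) + g('s', 0),
--         "num_P": g('P', 0),
--         "num_F": g('F', 0),
--         "num_Cl": num_cl,
--         "num_Br": num_br,
--         "stereocenters": g('@', 0),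
--         "net_charge": g('+', 0) - g('-', 0),
--     }
-- ===== Notes on version B (the rewrite author's own statement) =====
-- stated objective: alternative
-- what changed: Replaces A's ~16 separate scans of the string (repeated .count calls and a generator sum) by a single pass that builds a per-character count table while detecting 'Cl'/'Br' via the previous character, then reads every feature out of the table.
import Mathlib
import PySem

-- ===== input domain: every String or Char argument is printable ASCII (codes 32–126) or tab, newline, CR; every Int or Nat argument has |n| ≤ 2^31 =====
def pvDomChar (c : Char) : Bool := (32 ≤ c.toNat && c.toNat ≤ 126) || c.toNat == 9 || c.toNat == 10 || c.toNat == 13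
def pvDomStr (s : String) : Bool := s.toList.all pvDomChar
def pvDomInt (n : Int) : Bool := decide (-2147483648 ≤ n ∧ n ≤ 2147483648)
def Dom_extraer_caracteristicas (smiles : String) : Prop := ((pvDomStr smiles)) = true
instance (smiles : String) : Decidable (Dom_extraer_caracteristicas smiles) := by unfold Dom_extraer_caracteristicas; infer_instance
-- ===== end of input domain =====

-- B replaces A's ~16 separate scans of the string by one pass building a character-count
-- table (plus previous-char detection of "Cl"/"Br") and a read-out; return value only.

-- ===== PORT A =====
def extraer_caracteristicas (smiles : String) : List (String × Int) :=
  [("length", PySem.Str.len smiles),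
   ("num_rings", ((smiles.toList.map (fun c => if PySem.Chars.isdigit c then (1 : Int) else 0)).sum)),
   ("num_branches", (PySem.Str.count smiles "(" : Int)),
   ("double_bonds", (PySem.Str.count smiles "=" : Int)),
   ("triple_bonds", (PySem.Str.count smiles "#" : Int)),
   ("aromatic_atoms", (("cnosp".toList.map (fun c => (PySem.Chars.count smiles.toList [c] : Int))).sum)),
   ("num_N", (PySem.Str.count smiles "N" : Int) + (PySem.Str.count smiles "n" : Int)),
   ("num_O", (PySem.Str.count smiles "O" : Int) + (PySem.Str.count smiles "o" : Int)),
   ("num_S", (PySem.Str.count smiles "S" : Int) + (PySem.Str.count smiles "s" : Int)),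
   ("num_P", (PySem.Str.count smiles "P" : Int)),
   ("num_F", (PySem.Str.count smiles "F" : Int)),
   ("num_Cl", (PySem.Str.count smiles "Cl" : Int)),
   ("num_Br", (PySem.Str.count smiles "Br" : Int)),
   ("stereocenters", (PySem.Str.count smiles "@" : Int)),
   ("net_charge", (PySem.Str.count smiles "+" : Int) - (PySem.Str.count smiles "-" : Int))]

-- ===== PORT B =====
-- loop body of Source B: update counter, digit count, Cl/Br counts, previous char
def pvStepB (st : PySem.Dict Char Int × Int × Int × Int × Option Char) (c : Char) :
    PySem.Dict Char Int × Int × Int × Int × Option Char :=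
  let (d, cl, br, dig, prev) := st
  (d.insert c (d.getD c 0 + 1),
   (if prev = some 'C' ∧ c = 'l' then cl + 1 else cl),
   (if prev = some 'B' ∧ c = 'r' then br + 1 else br),
   (if PySem.Chars.isdigit c then dig + 1 else dig),
   some c)

def extraer_caracteristicas_alt (smiles : String) : List (String × Int) :=
  let st := smiles.toList.foldl pvStepB (PySem.Dict.empty, 0, 0, 0, none)
  let g : Char → Int := fun c => st.1.getD c 0
  [("length", PySem.Str.len smiles),
   ("num_rings", st.2.2.2.1),
   ("num_branches", g '('),
   ("double_bonds", g '='),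
   ("triple_bonds", g '#'),
   ("aromatic_atoms", g 'c' + g 'n' + g 'o' + g 's' + g 'p'),
   ("num_N", g 'N' + g 'n'),
   ("num_O", g 'O' + g 'o'),
   ("num_S", g 'S' + g 's'),
   ("num_P", g 'P'),
   ("num_F", g 'F'),
   ("num_Cl", st.2.1),
   ("num_Br", st.2.2.1),
   ("stereocenters", g '@'),
   ("net_charge", g '+' - g '-')]

-- ===== PRECONDITION & SPEC =====
def Spec_extraer_caracteristicas (smiles : String) (out : List (String × Int)) : Prop := out = extraer_caracteristicas_alt smiles
instance (smiles : String) (out : List (String × Int)) : Decidable (Spec_extraer_caracteristicas smiles out) := by unfold Spec_extraer_caracteristicas; infer_instance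

-- ===== CLAIM (what is proved, stated in full; the proofs are below) =====
def Claim_equal_extraer_caracteristicas : Prop := ∀ (smiles : String), Dom_extraer_caracteristicas smiles → Spec_extraer_caracteristicas smiles (extraer_caracteristicas smiles)

-- ===== LEMMAS AND PROOFS =====

-- number of indices i with l[i] = a and l[i+1] = b, tracking the previous character p
def pvPairCnt (a b : Char) : Option Char -> List Char -> Nat
  | _, [] => 0
  | p, c :: t => (if p = some a ∧ c = b then 1 else 0) + pvPairCnt a b (some c) t

lemma pvPairCnt_eq (a b : Char) (p : Option Char) (l : List Char) :
    pvPairCnt a b p l = (if p = some a ∧ l.head? = some b then 1 else 0) + pvPairCnt a b none l := by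
  cases l with
  | nil => simp [pvPairCnt]
  | cons c t => simp [pvPairCnt]

lemma count_go_single (a : Char) :
    ∀ fuel l acc, l.length ≤ fuel ->
      PySem.Chars.count.go [a] fuel l acc = acc + l.count a := by
  intro fuel
  induction fuel with
  | zero =>
    intro l acc h
    have : l = [] := List.eq_nil_of_length_eq_zero (Nat.le_zero.mp h)
    subst this; simp [PySem.Chars.count.go]
  | succ n ih =>
    intro l acc h
    cases l with
    | nil => simp [PySem.Chars.count.go]
    | cons x t =>
      have ht : t.length ≤ n := by simp at h; omega
      simp only [PySem.Chars.count.go]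
      by_cases hx : x = a
      · subst hx
        simp only [List.isPrefixOf, BEq.rfl, Bool.true_and, if_true,
          List.length_cons, List.length_nil, List.drop_succ_cons, List.drop_zero]
        rw [ih t (acc + 1) ht]
        simp; omega
      · have hpre : [a].isPrefixOf (x :: t) = false := by
          simp [List.isPrefixOf]; exact fun hh => (hx hh.symm).elim
        rw [hpre]
        simp only [Bool.false_eq_true, if_false]
        rw [ih t acc ht]
        simp [hx]

lemma count_single (a : Char) (l : List Char) :
    PySem.Chars.count l [a] = l.count a := by
  simpa using count_go_single a l.length l 0 le_rfl

lemma count_go_pair (a b : Char) (hab : a ≠ b) :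
    ∀ fuel l acc, l.length ≤ fuel ->
      PySem.Chars.count.go [a, b] fuel l acc = acc + pvPairCnt a b none l := by
  intro fuel
  induction fuel with
  | zero =>
    intro l acc h
    have : l = [] := List.eq_nil_of_length_eq_zero (Nat.le_zero.mp h)
    subst this; simp [PySem.Chars.count.go, pvPairCnt]
  | succ n ih =>
    intro l acc h
    cases l with
    | nil => simp [PySem.Chars.count.go, pvPairCnt]
    | cons x t =>
      simp only [PySem.Chars.count.go]
      by_cases hpre : [a, b].isPrefixOf (x :: t) = true
      · obtain ⟨hx, t', ht⟩ : x = a ∧ ∃ t', t = b :: t' := by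
          cases t with
          | nil => simp [List.isPrefixOf] at hpre
          | cons y t' =>
            simp [List.isPrefixOf] at hpre
            exact ⟨hpre.1.symm, t', by rw [hpre.2.symm]⟩
        subst hx; subst ht
        rw [hpre]
        simp only [if_true, List.length_cons, List.length_nil, List.drop_succ_cons, List.drop_zero]
        rw [ih t' (acc + 1) (by simp at h ⊢; omega)]
        have hr : pvPairCnt x b none (x :: b :: t') = 1 + pvPairCnt x b none t' := by
          simp only [pvPairCnt]
          rw [pvPairCnt_eq]
          simp [Ne.symm hab]
        rw [hr]; omega
      · rw [eq_false_of_ne_true hpre]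
        simp only [Bool.false_eq_true, if_false]
        rw [ih t acc (by simp at h ⊢; omega)]
        have hnot : ¬ (x = a ∧ t.head? = some b) := by
          rintro ⟨hx, hh⟩
          apply hpre
          cases t with
          | nil => simp at hh
          | cons y t' => simp at hh; simp [List.isPrefixOf, hx, hh]
        have hr : pvPairCnt a b none (x :: t) = pvPairCnt a b none t := by
          simp only [pvPairCnt]
          rw [pvPairCnt_eq]
          have hx : ¬ ((some x : Option Char) = some a ∧ t.head? = some b) := by
            rintro ⟨h1, h2⟩; exact hnot ⟨by simpa using h1, h2⟩
          rw [if_neg hx]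
          simp
        rw [hr]

lemma count_pair (a b : Char) (hab : a ≠ b) (l : List Char) :
    PySem.Chars.count l [a, b] = pvPairCnt a b none l := by
  simpa using count_go_pair a b hab l.length l 0 le_rfl

-- the single big-loop invariant: B's fold computes counter, Cl/Br pair counts and digit count
lemma foldB_spec :
    ∀ (l : List Char) (d : PySem.Dict Char Int) (cl br dig : Int) (prev : Option Char),
      l.foldl pvStepB (d, cl, br, dig, prev) =
        (l.foldl (fun d c => d.insert c (d.getD c 0 + 1)) d,
         cl + (pvPairCnt 'C' 'l' prev l : Int),
         br + (pvPairCnt 'B' 'r' prev l : Int),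
         dig + (l.countP PySem.Chars.isdigit : Int),
         l.getLast?.or prev) := by
  intro l
  induction l with
  | nil => intro d cl br dig prev; simp [pvPairCnt]
  | cons c t ih =>
    intro d cl br dig prev
    simp only [List.foldl_cons, pvStepB]
    rw [ih]
    refine Prod.ext rfl (Prod.ext ?_ (Prod.ext ?_ (Prod.ext ?_ ?_)))
    · simp only [pvPairCnt]; split_ifs <;> push_cast <;> ring
    · simp only [pvPairCnt]; split_ifs <;> push_cast <;> ring
    · simp only [List.countP_cons]; split_ifs with hd <;> (simp; try ring)
    · cases hg : (c :: t).getLast? with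
      | none => simp at hg
      | some z =>
        cases t with
        | nil => simp_all
        | cons y t' => simp_all

lemma getD_run (l : List Char) (v : Char) :
    (l.foldl (fun d c => PySem.Dict.insert d c (d.getD c 0 + 1)) PySem.Dict.empty).getD v 0
      = (l.count v : Int) := by
  rw [PySem.Dict.getD_foldl_insert_add_one]
  simp

-- ===== VERDICT (by name: the statement is the Claim_ definition above) =====
theorem extraer_caracteristicas_spec : Claim_equal_extraer_caracteristicas := by
  intro smiles _
  unfold Spec_extraer_caracteristicas extraer_caracteristicas extraer_caracteristicas_alt
  simp only [foldB_spec, zero_add, getD_run, PySem.Str.count_eq,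
    show ("(" : String).toList = ['('] from rfl, show ("=" : String).toList = ['='] from rfl,
    show ("#" : String).toList = ['#'] from rfl, show ("cnosp" : String).toList = ['c','n','o','s','p'] from rfl,
    show ("N" : String).toList = ['N'] from rfl, show ("n" : String).toList = ['n'] from rfl,
    show ("O" : String).toList = ['O'] from rfl, show ("o" : String).toList = ['o'] from rfl,
    show ("S" : String).toList = ['S'] from rfl, show ("s" : String).toList = ['s'] from rfl,
    show ("P" : String).toList = ['P'] from rfl, show ("F" : String).toList = ['F'] from rfl,
    show ("Cl" : String).toList = ['C','l'] from rfl, show ("Br" : String).toList = ['B','r'] from rfl,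
    show ("@" : String).toList = ['@'] from rfl, show ("+" : String).toList = ['+'] from rfl,
    show ("-" : String).toList = ['-'] from rfl,
    count_single, count_pair 'C' 'l' (by decide), count_pair 'B' 'r' (by decide),
    PySem.List.sum_map_ite_one_zero, List.map, List.sum_cons, List.sum_nil]
  norm_num
  omega
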